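-- pv_equiv track=rewrite | github.com/linhdvu14/cp-sols | sols/Google/CodeJam/2020/2020_0/B_Nesting_Depth.py | solve
-- ===== SOURCE A (Python) =====
-- def solve(nums):
-- 	def recurse(nums, k):  # k = count outside parentheses
-- 		if not nums: return ''
-- 		mn = min(nums)
-- 		res = ''
-- 		buff, buffmn = [], []
-- 		for n in nums:
-- 			if n == mn:
-- 				if buff:
-- 					res += recurse(buff, mn)
-- 					buff = []
-- 				buffmn.append(n)
-- 			if n != mn:
-- 				if buffmn:
-- 					res += str(mn)*len(buffmn)
-- 					buffmn = []
-- 				buff.append(n)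
-- 		if buff:
-- 			res += recurse(buff, mn)
-- 		if buffmn:
-- 			res += str(mn)*len(buffmn)
--
-- 		return '('*(mn-k) + res + ')'*(mn-k)
--
-- 	return recurse(nums,0)
-- ===== SOURCE B (Python) =====
-- def solve(nums):
--     base = min(0, min(nums)) if nums else 0
--     out = []
--     prev = base
--     for n in nums:
--         if prev < n:
--             out.append('(' * (n - prev))
--         elif n < prev:
--             out.append(')' * (prev - n))
--         out.append(str(n))
--         prev = n
--     out.append(')' * (prev - base))
--     return ''.join(out)
-- ===== Notes on version B (the rewrite author's own statement) =====
-- stated objective: faster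
-- what changed: replaced the recursive min-splitting (min + re-scan + recursion per level) by a single left-to-right pass that emits opening/closing parentheses on each depth change relative to the previous element (baseline min(0,min(nums)), which is what A's clamped top level computes)
import Mathlib
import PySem

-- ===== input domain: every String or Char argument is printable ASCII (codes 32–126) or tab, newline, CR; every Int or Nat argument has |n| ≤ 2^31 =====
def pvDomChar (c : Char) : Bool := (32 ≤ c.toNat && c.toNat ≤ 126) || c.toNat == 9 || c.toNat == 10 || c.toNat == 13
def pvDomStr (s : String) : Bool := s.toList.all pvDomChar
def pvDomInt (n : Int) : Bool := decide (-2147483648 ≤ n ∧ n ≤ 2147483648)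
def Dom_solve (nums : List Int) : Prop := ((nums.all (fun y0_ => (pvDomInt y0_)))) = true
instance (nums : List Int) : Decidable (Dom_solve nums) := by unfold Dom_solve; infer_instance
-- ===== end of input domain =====

-- B replaces A's recursive min-splitting by one pass emitting parentheses on each depth change (faster).

-- ===== PORT A =====
-- recurse(nums, k): fuel only makes the nested recursion structurally total; nums.length + 1 always suffices.
-- Strings are built as List Char (Python '+'/'*' on str = append/replicate) and wrapped by String.ofList at the end.
def recurseA : Nat → List Int → Int → List Char
  | 0, _, _ => []
  | fuel+1, nums, k =>
    if nums = [] then []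
    else
      match PySem.List.min? nums (fun x => x) with
      | none => []  -- unreachable: nums ≠ []
      | some mn =>
        let st := nums.foldl (fun (st : List Char × List Int × List Int) n =>
          if n = mn then
            let res := if st.2.1 ≠ [] then st.1 ++ recurseA fuel st.2.1 mn else st.1
            let buff := if st.2.1 ≠ [] then ([] : List Int) else st.2.1
            (res, buff, st.2.2 ++ [n])
          else
            let res := if st.2.2 ≠ [] then st.1 ++ PySem.List.pyRepeat (PySem.Int.toChars mn) (st.2.2.length : Int) else st.1
            let buffmn := if st.2.2 ≠ [] then ([] : List Int) else st.2.2
            (res, st.2.1 ++ [n], buffmn)) ([], [], [])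
        let res1 := if st.2.1 ≠ [] then st.1 ++ recurseA fuel st.2.1 mn else st.1
        let res2 := if st.2.2 ≠ [] then res1 ++ PySem.List.pyRepeat (PySem.Int.toChars mn) (st.2.2.length : Int) else res1
        PySem.List.pyRepeat ['('] (mn - k) ++ res2 ++ PySem.List.pyRepeat [')'] (mn - k)

def solve (nums : List Int) : String := String.ofList (recurseA (nums.length + 1) nums 0)

-- ===== PORT B =====
def solve_alt (nums : List Int) : String :=
  let base := match PySem.List.min? nums (fun x => x) with
    | none => 0
    | some m => min 0 m
  let st := nums.foldl (fun (st : List Char × Int) n =>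
    let out := if st.2 < n then st.1 ++ PySem.List.pyRepeat ['('] (n - st.2)
               else if n < st.2 then st.1 ++ PySem.List.pyRepeat [')'] (st.2 - n)
               else st.1
    (out ++ PySem.Int.toChars n, n)) ([], base)
  String.ofList (st.1 ++ PySem.List.pyRepeat [')'] (st.2 - base))

-- ===== PRECONDITION & SPEC =====
def Spec_solve (nums : List Int) (out : String) : Prop := out = solve_alt nums
instance (nums : List Int) (out : String) : Decidable (Spec_solve nums out) := by unfold Spec_solve; infer_instance

-- ===== CLAIM (what is proved, stated in full; the proofs are below) =====
def Claim_equal_solve : Prop := ∀ (nums : List Int), Dom_solve nums → Spec_solve nums (solve nums)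

-- ===== LEMMAS AND PROOFS =====

-- repetition of one char by an integer count (Python 'c'*i; empty for i ≤ 0)
def rep (c : Char) (i : Int) : List Char := List.replicate i.toNat c

theorem pyRepeat_single (c : Char) (i : Int) :
    PySem.List.pyRepeat [c] i = rep c i := by
  simp [PySem.List.pyRepeat_singleton, rep]

-- one transition of the single-pass walk: parens from depth p to depth n, then the digits of n
def wstep (p n : Int) : List Char :=
  (if p < n then rep '(' (n - p) else if n < p then rep ')' (p - n) else []) ++ PySem.Int.toChars n

def walk : List Int → Int → List Char
  | [], _ => []
  | n :: t, p => wstep p n ++ walk t n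

-- A's loop body and trailing flushes, named for the proofs (definitionally the terms in recurseA)
def bodyA (fuel : Nat) (mn : Int) (st : List Char × List Int × List Int) (n : Int) :
    List Char × List Int × List Int :=
  if n = mn then
    let res := if st.2.1 ≠ [] then st.1 ++ recurseA fuel st.2.1 mn else st.1
    let buff := if st.2.1 ≠ [] then ([] : List Int) else st.2.1
    (res, buff, st.2.2 ++ [n])
  else
    let res := if st.2.2 ≠ [] then st.1 ++ PySem.List.pyRepeat (PySem.Int.toChars mn) (st.2.2.length : Int) else st.1
    let buffmn := if st.2.2 ≠ [] then ([] : List Int) else st.2.2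
    (res, st.2.1 ++ [n], buffmn)

def finA (fuel : Nat) (mn : Int) (st : List Char × List Int × List Int) : List Char :=
  let res1 := if st.2.1 ≠ [] then st.1 ++ recurseA fuel st.2.1 mn else st.1
  if st.2.2 ≠ [] then res1 ++ PySem.List.pyRepeat (PySem.Int.toChars mn) (st.2.2.length : Int) else res1

theorem recurseA_succ (fuel : Nat) (nums : List Int) (k mn : Int)
    (hne : nums ≠ []) (hmn : PySem.List.min? nums (fun x => x) = some mn) :
    recurseA (fuel+1) nums k =
      PySem.List.pyRepeat ['('] (mn - k) ++
        finA fuel mn (nums.foldl (bodyA fuel mn) ([], [], [])) ++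
      PySem.List.pyRepeat [')'] (mn - k) := by
  unfold recurseA bodyA finA
  rw [if_neg hne, hmn]

theorem getLastD_ne_nil {l : List Int} (h : l ≠ []) (a b : Int) :
    l.getLastD a = l.getLastD b := by
  obtain ⟨y, hy⟩ := Option.isSome_iff_exists.mp (List.getLast?_isSome.mpr h)
  simp [List.getLastD_eq_getLast?, hy]

theorem getLastD_mem {l : List Int} (h : l ≠ []) (a : Int) : l.getLastD a ∈ l := by
  obtain ⟨y, hy⟩ := Option.isSome_iff_exists.mp (List.getLast?_isSome.mpr h)
  rw [List.getLastD_eq_getLast?, hy]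
  exact List.mem_of_getLast? hy

theorem rep_add (c : Char) (a b : Int) (ha : 0 ≤ a) (hb : 0 ≤ b) :
    rep c a ++ rep c b = rep c (a + b) := by
  simp only [rep]
  rw [← List.replicate_add]
  congr 1
  omega

theorem pyRepeat_len_succ (xs : List Char) (L : Nat) :
    PySem.List.pyRepeat xs ((L + 1 : Nat) : Int) = PySem.List.pyRepeat xs (L : Int) ++ xs := by
  have h : ∀ (m : Nat), PySem.List.pyRepeat xs ((m : Nat) : Int) = (List.replicate m xs).flatten := by
    intro m
    simp [PySem.List.pyRepeat]
  rw [h, h, List.replicate_succ']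
  simp

theorem wstep_merge_open (k m n : Int) (h1 : k ≤ m) (h2 : m ≤ n) :
    rep '(' (m - k) ++ wstep m n = wstep k n := by
  unfold wstep rep
  rw [← List.append_assoc]
  congr 1
  split_ifs
  all_goals first
    | (exfalso; omega)
    | (simp [show (m - k).toNat = 0 from by omega])
    | (rw [← List.replicate_add]; congr 1; omega)
    | (rw [List.append_nil]; congr 1; omega)

theorem rep_close_merge (c : Char) (a m k : Int) (h1 : k ≤ m) (h2 : m ≤ a) :
    rep c (a - m) ++ rep c (m - k) = rep c (a - k) := by
  rw [rep_add _ _ _ (by omega) (by omega)]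
  congr 1
  omega

theorem walk_append_one (b : List Int) (n p : Int) :
    walk (b ++ [n]) p = walk b p ++ wstep (b.getLastD p) n := by
  induction b generalizing p with
  | nil => simp [walk]
  | cons x t ih =>
    show wstep p x ++ walk (t ++ [n]) x = (wstep p x ++ walk t x) ++ wstep ((x :: t).getLastD p) n
    rw [ih, List.getLastD_cons, List.append_assoc]

-- the state relation of A's loop: res holds the fully emitted prefix, (buff, buffmn) the pending run
def StRel (mn : Int) (buff buffmn : List Int) (P : List Char) (prev : Int) : Prop :=
  (buff = [] ∧ buffmn = [] ∧ P = [] ∧ prev = mn) ∨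
  (buff = [] ∧ buffmn ≠ [] ∧ P = PySem.List.pyRepeat (PySem.Int.toChars mn) (buffmn.length : Int) ∧ prev = mn) ∨
  (buff ≠ [] ∧ buffmn = [] ∧ P = walk buff mn ∧ prev = buff.getLastD 0)

-- invariant proof for A's loop
theorem foldA_walk (fuel : Nat) (mn : Int)
    (H : ∀ b : List Int, b.length ≤ fuel → b ≠ [] → (∀ x ∈ b, mn < x) →
      recurseA fuel b mn = walk b mn ++ rep ')' (b.getLastD 0 - mn)) :
    ∀ (xs : List Int) (res : List Char) (buff buffmn : List Int) (P : List Char) (prev : Int),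
      (∀ x ∈ xs, mn ≤ x) → (∀ x ∈ buff, mn < x) → (∀ x ∈ buffmn, x = mn) →
      buff.length + xs.length ≤ fuel + 1 →
      (mn ∈ xs ∨ buff.length + xs.length ≤ fuel) →
      StRel mn buff buffmn P prev →
      finA fuel mn (xs.foldl (bodyA fuel mn) (res, buff, buffmn)) =
        res ++ P ++ walk xs prev ++ rep ')' (xs.getLastD prev - mn) := by
  intro xs
  induction xs with
  | nil =>
    intro res buff buffmn P prev _ hbuff hbuffmn hlen hfuel hst
    rcases hst with ⟨h1, h2, hP, hprev⟩ | ⟨h1, h2, hP, hprev⟩ | ⟨h1, h2, hP, hprev⟩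
    · subst h1; subst h2; subst hP; rw [hprev]
      simp [finA, walk, rep, List.foldl]
    · subst h1; subst hP; rw [hprev]
      simp [finA, walk, if_pos h2, rep, List.foldl]
    · subst h2; subst hP; rw [hprev]
      have hble : buff.length ≤ fuel := by
        rcases hfuel with h | h
        · simp at h
        · simpa using h
      simp only [List.foldl, finA, if_pos h1, ne_eq, not_true_eq_false]
      rw [H buff hble h1 hbuff]
      simp [walk, List.append_assoc]
  | cons n t ih =>
    intro res buff buffmn P prev hxs hbuff hbuffmn hlen hfuel hst
    have hmn_le_n : mn ≤ n := hxs n (by simp)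
    simp only [List.foldl]
    by_cases hn : n = mn
    · -- n == mn branch
      subst hn
      rcases hst with ⟨h1, h2, hP, hprev⟩ | ⟨h1, h2, hP, hprev⟩ | ⟨h1, h2, hP, hprev⟩
      · -- St0 → St1
        subst h1; subst h2; subst hP; rw [hprev]
        rw [show bodyA fuel n (res, [], []) n = (res, [], [n]) by simp [bodyA]]
        rw [ih res [] [n] (PySem.Int.toChars n) n
          (fun x hx => hxs x (by simp [hx])) (by simp) (by simp)
          (by simp at hlen ⊢; omega) (by right; simp at hlen ⊢; omega)
          (by right; left; refine ⟨rfl, by simp, ?_, rfl⟩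
              simp [PySem.List.pyRepeat])]
        rw [show walk (n :: t) n = PySem.Int.toChars n ++ walk t n by
          simp [walk, wstep]]
        rw [List.getLastD_cons]
        simp [List.append_assoc]
      · -- St1 → St1 (one more mn)
        subst h1; subst hP; rw [hprev]
        rw [show bodyA fuel n (res, [], buffmn) n = (res, [], buffmn ++ [n]) by simp [bodyA]]
        rw [ih res [] (buffmn ++ [n]) (PySem.List.pyRepeat (PySem.Int.toChars n) ((buffmn ++ [n]).length : Int)) n
          (fun x hx => hxs x (by simp [hx])) (by simp)
          (by intro x hx; rcases List.mem_append.mp hx with h | h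
              · exact hbuffmn x h
              · simpa using h)
          (by simp at hlen ⊢; omega) (by right; simp at hlen ⊢; omega)
          (by right; left; exact ⟨rfl, by simp, rfl, rfl⟩)]
        rw [show walk (n :: t) n = PySem.Int.toChars n ++ walk t n by
          simp [walk, wstep]]
        rw [show (((buffmn ++ [n]).length : Nat) : Int) = ((buffmn.length + 1 : Nat) : Int) by simp,
          pyRepeat_len_succ]
        rw [List.getLastD_cons]
        simp [List.append_assoc]
      · -- St2 → St1 (flush buff)
        subst h2; subst hP; rw [hprev]
        rw [show bodyA fuel n (res, buff, []) n
            = (res ++ recurseA fuel buff n, [], [n]) by simp [bodyA, if_pos h1]]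
        have hble : buff.length ≤ fuel := by simp at hlen; omega
        rw [ih (res ++ recurseA fuel buff n) [] [n] (PySem.Int.toChars n) n
          (fun x hx => hxs x (by simp [hx])) (by simp) (by simp)
          (by simp at hlen ⊢; omega) (by right; simp at hlen ⊢; omega)
          (by right; left; refine ⟨rfl, by simp, ?_, rfl⟩
              simp [PySem.List.pyRepeat])]
        rw [H buff hble h1 hbuff]
        have hlt : n < buff.getLastD 0 := hbuff _ (getLastD_mem h1 (0 : Int))
        rw [show walk (n :: t) (buff.getLastD 0)
            = rep ')' (buff.getLastD 0 - n) ++ (PySem.Int.toChars n ++ walk t n) by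
          show wstep (buff.getLastD 0) n ++ walk t n = _
          unfold wstep
          rw [if_neg (by omega : ¬ buff.getLastD 0 < n), if_pos hlt, List.append_assoc]]
        rw [List.getLastD_cons]
        simp [List.append_assoc]
    · -- n != mn branch
      have hlt : mn < n := lt_of_le_of_ne hmn_le_n (fun h => hn h.symm)
      have hstep : ∀ x ∈ t, mn ≤ x := fun x hx => hxs x (by simp [hx])
      have hfuel' : mn ∈ t ∨ (buff.length + 1) + t.length ≤ fuel := by
        rcases hfuel with h | h
        · left
          rcases List.mem_cons.mp h with h' | h'
          · exact absurd h'.symm hn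
          · exact h'
        · right; simp at h ⊢; omega
      rcases hst with ⟨h1, h2, hP, hprev⟩ | ⟨h1, h2, hP, hprev⟩ | ⟨h1, h2, hP, hprev⟩
      · -- St0 → St2
        subst h1; subst h2; subst hP; rw [hprev]
        rw [show bodyA fuel mn (res, [], []) n = (res, [n], []) by simp [bodyA, hn]]
        rw [ih res [n] [] (walk [n] mn) n
          hstep (by simpa using hlt) (by simp)
          (by simp at hlen ⊢; omega)
          (by simpa using hfuel')
          (by right; right; exact ⟨by simp, rfl, rfl, by simp⟩)]
        rw [show walk (n :: t) mn = walk [n] mn ++ walk t n by simp [walk]]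
        rw [List.getLastD_cons]
        simp [List.append_assoc]
      · -- St1 → St2 (flush buffmn)
        subst h1; subst hP; rw [hprev]
        rw [show bodyA fuel mn (res, [], buffmn) n
            = (res ++ PySem.List.pyRepeat (PySem.Int.toChars mn) ((buffmn.length : Nat) : Int), [n], [])
            by simp [bodyA, hn, if_pos h2]]
        rw [ih (res ++ PySem.List.pyRepeat (PySem.Int.toChars mn) ((buffmn.length : Nat) : Int)) [n] [] (walk [n] mn) n
          hstep (by simpa using hlt) (by simp)
          (by simp at hlen ⊢; omega)
          (by simpa using hfuel')
          (by right; right; exact ⟨by simp, rfl, rfl, by simp⟩)]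
        rw [show walk (n :: t) mn = walk [n] mn ++ walk t n by simp [walk]]
        rw [List.getLastD_cons]
        simp [List.append_assoc]
      · -- St2 → St2 (extend buff)
        subst h2; subst hP; rw [hprev]
        rw [show bodyA fuel mn (res, buff, []) n = (res, buff ++ [n], []) by simp [bodyA, hn]]
        rw [ih res (buff ++ [n]) [] (walk (buff ++ [n]) mn) n
          hstep
          (by intro x hx; rcases List.mem_append.mp hx with h | h
              · exact hbuff x h
              · simp at h; omega)
          (by simp)
          (by simp at hlen ⊢; omega)
          (by rcases hfuel' with h | h
              · exact Or.inl h
              · right; simp at h ⊢; omega)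
          (by right; right; exact ⟨by simp, rfl, rfl, by simp⟩)]
        rw [walk_append_one buff n mn, getLastD_ne_nil h1 mn 0]
        rw [show walk (n :: t) (buff.getLastD 0) = wstep (buff.getLastD 0) n ++ walk t n from rfl]
        rw [List.getLastD_cons]
        simp [List.append_assoc]

-- main characterisation of A's recursion
theorem recurseA_char : ∀ (fuel : Nat) (nums : List Int) (k mn : Int),
    nums.length ≤ fuel →
    PySem.List.min? nums (fun x => x) = some mn →
    recurseA fuel nums k =
      rep '(' (mn - k) ++ walk nums mn ++ rep ')' (nums.getLastD 0 - mn) ++ rep ')' (mn - k) := by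
  intro fuel
  induction fuel with
  | zero =>
    intro nums k mn hlen hmn
    have : nums = [] := List.length_eq_zero_iff.mp (Nat.le_zero.mp hlen)
    subst this
    simp [PySem.List.min?] at hmn
  | succ fuel ih =>
    intro nums k mn hlen hmn
    have hne : nums ≠ [] := by
      intro h; subst h; simp [PySem.List.min?] at hmn
    have hmem : mn ∈ nums := PySem.List.min?_mem hmn
    have hmin : ∀ y ∈ nums, mn ≤ y := fun y hy => PySem.List.min?_isMin hmn y hy
    have H : ∀ b : List Int, b.length ≤ fuel → b ≠ [] → (∀ x ∈ b, mn < x) →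
        recurseA fuel b mn = walk b mn ++ rep ')' (b.getLastD 0 - mn) := by
      intro b hble hbne hball
      obtain ⟨mnb, hmnb⟩ : ∃ m, PySem.List.min? b (fun x => x) = some m := by
        cases h : PySem.List.min? b (fun x => x) with
        | none => exact absurd ((PySem.List.min?_eq_none_iff b (fun x => x)).mp h) hbne
        | some m => exact ⟨m, rfl⟩
      have hmnb_mem : mnb ∈ b := PySem.List.min?_mem hmnb
      have hmnb_min : ∀ y ∈ b, mnb ≤ y := fun y hy => PySem.List.min?_isMin hmnb y hy
      have hlt : mn < mnb := hball _ hmnb_mem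
      rw [ih b mn mnb hble hmnb]
      obtain ⟨n0, t, rfl⟩ : ∃ n0 t, b = n0 :: t := by
        cases b with
        | nil => exact absurd rfl hbne
        | cons n0 t => exact ⟨n0, t, rfl⟩
      have hn0 : mnb ≤ n0 := hmnb_min n0 (by simp)
      have hlast : mnb ≤ (n0 :: t).getLastD 0 :=
        hmnb_min _ (getLastD_mem (by simp) 0)
      calc rep '(' (mnb - mn) ++ walk (n0 :: t) mnb ++ rep ')' ((n0 :: t).getLastD 0 - mnb) ++ rep ')' (mnb - mn)
          = (rep '(' (mnb - mn) ++ wstep mnb n0) ++ walk t n0 ++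
              (rep ')' ((n0 :: t).getLastD 0 - mnb) ++ rep ')' (mnb - mn)) := by
            simp [walk, List.append_assoc]
        _ = wstep mn n0 ++ walk t n0 ++ rep ')' ((n0 :: t).getLastD 0 - mn) := by
            rw [wstep_merge_open mn mnb n0 (le_of_lt hlt) hn0,
              rep_close_merge ')' _ mnb mn (le_of_lt hlt) hlast]
        _ = walk (n0 :: t) mn ++ rep ')' ((n0 :: t).getLastD 0 - mn) := by
            simp [walk, List.append_assoc]
    rw [recurseA_succ fuel nums k mn hne hmn]
    rw [foldA_walk fuel mn H nums [] [] [] [] mn hmin (by simp) (by simp)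
      (by simpa using hlen) (Or.inl hmem)
      (Or.inl ⟨rfl, rfl, rfl, rfl⟩)]
    rw [pyRepeat_single, pyRepeat_single, getLastD_ne_nil hne mn 0]
    simp [List.append_assoc]

-- B's loop
theorem foldB_walk (xs : List Int) : ∀ (out : List Char) (prev : Int),
    xs.foldl (fun (st : List Char × Int) n =>
      let out := if st.2 < n then st.1 ++ PySem.List.pyRepeat ['('] (n - st.2)
                 else if n < st.2 then st.1 ++ PySem.List.pyRepeat [')'] (st.2 - n)
                 else st.1
      (out ++ PySem.Int.toChars n, n)) (out, prev)
    = (out ++ walk xs prev, xs.getLastD prev) := by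
  induction xs with
  | nil => intro out prev; simp [walk]
  | cons n t ih =>
    intro out prev
    simp only [List.foldl, List.getLastD_cons]
    rw [ih]
    congr 1
    simp only [walk, wstep, pyRepeat_single, List.append_assoc]
    by_cases h1 : prev < n
    · rw [if_pos h1, if_pos h1, List.append_assoc]
    · rw [if_neg h1, if_neg h1]
      by_cases h2 : n < prev
      · rw [if_pos h2, if_pos h2, List.append_assoc]
      · rw [if_neg h2, if_neg h2]; simp

-- ===== VERDICT (by name: the statement is the Claim_ definition above) =====
theorem solve_spec : Claim_equal_solve := by
  unfold Claim_equal_solve Spec_solve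
  intro nums _
  cases hmn : PySem.List.min? nums (fun x => x) with
  | none =>
    have hnil : nums = [] := (PySem.List.min?_eq_none_iff nums (fun x => x)).mp hmn
    subst hnil
    simp [solve, solve_alt, recurseA, PySem.List.min?, PySem.List.pyRepeat]
  | some mn =>
    have hne : nums ≠ [] := by
      intro h; subst h; simp [PySem.List.min?] at hmn
    have hmem : mn ∈ nums := PySem.List.min?_mem hmn
    have hmin : ∀ y ∈ nums, mn ≤ y := fun y hy => PySem.List.min?_isMin hmn y hy
    have hA := recurseA_char (nums.length + 1) nums 0 mn (by omega) hmn
    have hlast : mn ≤ nums.getLastD 0 := hmin _ (getLastD_mem hne 0)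
    have hB : solve_alt nums
        = String.ofList (walk nums (min 0 mn) ++ PySem.List.pyRepeat [')'] (nums.getLastD (min 0 mn) - min 0 mn)) := by
      simp only [solve_alt, hmn]
      rw [foldB_walk nums [] (min 0 mn)]
      simp
    rw [hB, getLastD_ne_nil hne (min 0 mn) 0]
    unfold solve
    rw [hA, pyRepeat_single]
    by_cases h0 : 0 ≤ mn
    · have hmin0 : min 0 mn = 0 := by omega
      rw [hmin0]
      congr 1
      obtain ⟨n0, t, rfl⟩ : ∃ n0 t, nums = n0 :: t := by
        cases nums with
        | nil => exact absurd rfl hne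
        | cons n0 t => exact ⟨n0, t, rfl⟩
      have hn0 : mn ≤ n0 := hmin n0 (by simp)
      calc rep '(' (mn - 0) ++ walk (n0 :: t) mn ++ rep ')' ((n0 :: t).getLastD 0 - mn) ++ rep ')' (mn - 0)
          = (rep '(' (mn - 0) ++ wstep mn n0) ++ walk t n0 ++
              (rep ')' ((n0 :: t).getLastD 0 - mn) ++ rep ')' (mn - 0)) := by
            simp [walk, List.append_assoc]
        _ = wstep 0 n0 ++ walk t n0 ++ rep ')' ((n0 :: t).getLastD 0 - 0) := by
            rw [wstep_merge_open 0 mn n0 h0 hn0, rep_close_merge ')' _ mn 0 h0 hlast]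
        _ = walk (n0 :: t) 0 ++ rep ')' ((n0 :: t).getLastD 0 - 0) := by
            simp [walk, List.append_assoc]
    · have hmin0 : min 0 mn = mn := by omega
      rw [hmin0]
      congr 1
      simp [rep, show mn.toNat = 0 from by omega]
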